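-- pv_equiv track=rewrite | github.com/bartosz-socha/python_basics | U_app.py | mysk_fibbo2
-- ===== SOURCE A (Python) =====
-- def mysk_fibbo2(end_of_string):
--     old = [0]
--     new = [1]
--     string = 1
--     is_done = False
--     while not is_done:
--         old.append(new[string - 1])
--         new.append(new[string - 1] + old[string - 1])
--         string += 1
--         if new[string - 1] + old[string - 1] > end_of_string:
--             is_done = True
--     new.insert(0, 0)
--     return new
-- ===== SOURCE B (Python) =====
-- def mysk_fibbo2(end_of_string):
--     # Recursive decomposition: the state is just the last two Fibonacci values
--     # (two scalars), and the list is produced as [0, 1, 1] + recursively built tail.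
--     def tail(a, b):
--         s = a + b
--         if s > end_of_string:
--             return []
--         return [s] + tail(b, s)
--     return [0, 1, 1] + tail(1, 1)
-- ===== Notes on version B (the rewrite author's own statement) =====
-- stated objective: alternative
-- what changed: Replaces A's two parallel growing lists plus a manual index counter and trailing insert(0,0) with a recursion that carries only the last two Fibonacci values as scalars and builds the tail of the result front-to-back, prepended to the fixed seed [0,1,1].
import Mathlib
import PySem

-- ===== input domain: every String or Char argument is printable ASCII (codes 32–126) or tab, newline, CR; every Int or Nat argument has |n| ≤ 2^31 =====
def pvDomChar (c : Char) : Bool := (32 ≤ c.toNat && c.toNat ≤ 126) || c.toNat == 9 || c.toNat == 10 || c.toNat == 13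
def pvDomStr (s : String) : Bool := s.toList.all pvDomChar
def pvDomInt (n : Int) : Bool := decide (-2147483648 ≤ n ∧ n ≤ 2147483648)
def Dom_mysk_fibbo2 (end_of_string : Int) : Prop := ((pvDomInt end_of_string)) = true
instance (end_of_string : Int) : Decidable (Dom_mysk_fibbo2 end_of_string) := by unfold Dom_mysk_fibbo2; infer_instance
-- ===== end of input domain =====

-- B replaces A's two parallel growing lists and index counter by a recursion carrying
-- just the last two Fibonacci values as scalars, prepended to the seed [0,1,1]
-- (objective: alternative decomposition, same cost).

-- ===== PORT A =====
-- A's while loop, ported with a fuel bound as the termination device only (the loop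
-- guard and state updates are A's own; the appended sums grow as Fibonacci numbers, so
-- 101 iterations always suffice on Dom, and the equivalence below holds for any fuel).
-- The list indices new[string-1] / old[string-1] are always in range, so pyGetD's default 0 is never used.
def mysk_fibbo2_loop (end_of_string : Int) : Nat → List Int → List Int → Int → List Int
  | 0, _, new, _ => new
  | f + 1, old, new, string =>
    let old' := old ++ [PySem.List.pyGetD new (string - 1) 0]
    let new' := new ++ [PySem.List.pyGetD new (string - 1) 0 + PySem.List.pyGetD old' (string - 1) 0]
    let string' := string + 1
    if PySem.List.pyGetD new' (string' - 1) 0 + PySem.List.pyGetD old' (string' - 1) 0 > end_of_string then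
      new'
    else
      mysk_fibbo2_loop end_of_string f old' new' string'

def mysk_fibbo2 (end_of_string : Int) : List Int :=
  PySem.List.insert (mysk_fibbo2_loop end_of_string 101 [0] [1] 1) 0 0

-- ===== PORT B =====
-- B's recursive helper 'tail', same fuel device (100 levels always suffice on Dom).
def mysk_fibbo2_alt_tail (end_of_string : Int) : Nat → Int → Int → List Int
  | 0, _, _ => []
  | f + 1, a, b =>
    let s := a + b
    if s > end_of_string then []
    else s :: mysk_fibbo2_alt_tail end_of_string f b s

def mysk_fibbo2_alt (end_of_string : Int) : List Int :=
  [0, 1, 1] ++ mysk_fibbo2_alt_tail end_of_string 100 1 1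

-- ===== PRECONDITION & SPEC =====
def Spec_mysk_fibbo2 (end_of_string : Int) (out : List Int) : Prop := out = mysk_fibbo2_alt end_of_string
instance (end_of_string : Int) (out : List Int) : Decidable (Spec_mysk_fibbo2 end_of_string out) := by unfold Spec_mysk_fibbo2; infer_instance

-- ===== CLAIM (what is proved, stated in full; the proofs are below) =====
def Claim_equal_mysk_fibbo2 : Prop := ∀ (end_of_string : Int), Dom_mysk_fibbo2 end_of_string → Spec_mysk_fibbo2 end_of_string (mysk_fibbo2 end_of_string)

-- ===== LEMMAS AND PROOFS =====

-- pyGetD at the non-negative index |m|+1 of m ++ [u, v] (A's new[string-1])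
lemma pv_getD_snoc2_fst (m : List Int) (u v : Int) :
    PySem.List.pyGetD (m ++ [u, v]) ((m.length : Int) + 2 - 1) 0 = v := by
  have h : ((m.length : Int) + 2 - 1) = ((m.length + 1 : Nat) : Int) := by push_cast; ring
  rw [h, PySem.List.pyGetD_natCast]
  rw [List.getD_eq_getElem?_getD, List.getElem?_append_right (by omega)]
  simp

-- pyGetD at index |m|+1 of z :: m ++ [u, v] (A's old[string-1] after the append)
lemma pv_getD_cons_at_len1 (z : Int) (m : List Int) (u v : Int) :
    PySem.List.pyGetD (z :: (m ++ [u, v])) ((m.length : Int) + 2 - 1) 0 = u := by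
  have h : ((m.length : Int) + 2 - 1) = ((m.length + 1 : Nat) : Int) := by push_cast; ring
  rw [h, PySem.List.pyGetD_natCast]
  rw [List.getD_eq_getElem?_getD, List.getElem?_cons_succ, List.getElem?_append_right (by omega)]
  simp

-- pyGetD at index |m|+2 of z :: m ++ [u, v] (A's old[string-1] at the guard)
lemma pv_getD_cons_at_len2 (z : Int) (m : List Int) (u v : Int) :
    PySem.List.pyGetD (z :: (m ++ [u, v])) ((m.length : Int) + 2 + 1 - 1) 0 = v := by
  have h : ((m.length : Int) + 2 + 1 - 1) = ((m.length + 2 : Nat) : Int) := by push_cast; ring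
  rw [h, PySem.List.pyGetD_natCast]
  rw [List.getD_eq_getElem?_getD, List.getElem?_cons_succ, List.getElem?_append_right (by omega)]
  simp

-- The two recursions advance in lockstep.  After at least one iteration A's state
-- (old, new, string) has the shape old = z :: m ++ [u], new = m ++ [u, v],
-- string = |m| + 2; the corresponding B state is the scalar pair (v, v+u), the list
-- built so far being z :: m ++ [u, v, v+u].
lemma pv_loop_eq (e z : Int) : ∀ (f : Nat) (m : List Int) (u v : Int),
    z :: mysk_fibbo2_loop e (f + 1) (z :: (m ++ [u])) (m ++ [u, v]) ((m.length : Int) + 2)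
      = (z :: (m ++ [u, v, v + u])) ++ mysk_fibbo2_alt_tail e f v (v + u) := by
  intro f
  induction f with
  | zero =>
    intro m u v
    rw [mysk_fibbo2_loop, mysk_fibbo2_alt_tail]
    rw [pv_getD_snoc2_fst m u v]
    have h1 : z :: (m ++ [u]) ++ [v] = z :: (m ++ [u, v]) := by simp
    rw [h1, pv_getD_cons_at_len1 z m u v]
    split
    · simp
    · rw [mysk_fibbo2_loop]; simp
  | succ f ih =>
    intro m u v
    rw [mysk_fibbo2_loop]
    rw [pv_getD_snoc2_fst m u v]
    have h1 : z :: (m ++ [u]) ++ [v] = z :: (m ++ [u, v]) := by simp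
    rw [h1, pv_getD_cons_at_len1 z m u v]
    have h2 : m ++ [u, v] ++ [v + u] = (m ++ [u]) ++ [v, v + u] := by simp
    have h3 : PySem.List.pyGetD (m ++ [u, v] ++ [v + u]) ((m.length : Int) + 2 + 1 - 1) 0 = v + u := by
      rw [h2]
      have := pv_getD_snoc2_fst (m ++ [u]) v (v + u)
      rw [List.length_append] at this
      push_cast at this ⊢
      convert this using 2
    rw [h3, pv_getD_cons_at_len2 z m u v]
    rw [mysk_fibbo2_alt_tail]
    by_cases hc : v + u + v > e
    · rw [if_pos hc, if_pos (show v + (v + u) > e by omega)]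
      simp
    · rw [if_neg hc, if_neg (show ¬ v + (v + u) > e by omega)]
      have hgoal := ih (m ++ [u]) v (v + u)
      simp only [List.append_assoc, List.cons_append, List.nil_append,
        List.length_append, List.length_cons, List.length_nil] at hgoal ⊢
      push_cast at hgoal ⊢
      ring_nf at hgoal ⊢
      exact hgoal

-- ===== VERDICT (by name: the statement is the Claim_ definition above) =====
theorem mysk_fibbo2_spec : Claim_equal_mysk_fibbo2 := by
  intro e _
  unfold Spec_mysk_fibbo2 mysk_fibbo2 mysk_fibbo2_alt
  rw [PySem.List.insert_zero]
  -- unfold the first iteration of A's loop and of B's recursion by hand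
  rw [show (101 : Nat) = 100 + 1 from rfl, mysk_fibbo2_loop]
  rw [show (100 : Nat) = 99 + 1 from rfl, mysk_fibbo2_alt_tail]
  norm_num [PySem.List.pyGetD, PySem.List.pyGet?, PySem.List.pyIdx?, show Int.toNat 2 = 2 from rfl]
  have key := pv_loop_eq e 0 99 [] 1 1
  norm_num [PySem.List.pyGetD, PySem.List.pyGet?, PySem.List.pyIdx?, show Int.toNat 2 = 2 from rfl] at key
  split_ifs with h1 <;> first | rfl | exact key
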